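-- pv_equiv track=rewrite | github.com/manjeetahuja23/Job-Application-Bot | app/matching/filters.py | filter_by_title_keywords
-- ===== SOURCE A (Python) =====
-- from typing import Iterable, List, Mapping
--
-- def _normalize(values: Iterable[str]) -> list[str]:
--     return [value.strip() for value in values if value and value.strip()]
--
-- def filter_by_title_keywords(
--     jobs: Iterable[Mapping[str, object]],
--     keywords: Iterable[str],
-- ) -> List[Mapping[str, object]]:
--     """Return jobs whose title contains at least one configured keyword."""
--
--     keyword_list = [keyword.lower() for keyword in _normalize(keywords)]
--     if not keyword_list:
--         return list(jobs)
--     result: list[Mapping[str, object]] = []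
--     for job in jobs:
--         title = str(job.get("title", "")).lower()
--         if any(keyword in title for keyword in keyword_list):
--             result.append(job)
--     return result
-- ===== SOURCE B (Python) =====
-- from typing import Iterable, List, Mapping
--
--
-- def filter_by_title_keywords(
--     jobs: Iterable[Mapping[str, object]],
--     keywords: Iterable[str],
-- ) -> List[Mapping[str, object]]:
--     """Return jobs whose title contains at least one configured keyword.
--
--     Keyword-major strategy: each keyword is matched only against the titles
--     no earlier keyword has already claimed, so the candidate pool shrinks as
--     keywords are processed and the loop stops once every job has matched.
--     """
--     kws = [k.strip().lower() for k in keywords if k and k.strip()]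
--     jobs = list(jobs)
--     if not kws:
--         return jobs
--     pending = [(i, str(job.get("title", "")).lower()) for i, job in enumerate(jobs)]
--     for kw in kws:
--         pending = [(i, t) for i, t in pending if kw not in t]
--         if not pending:
--             break
--     unmatched = {i for i, _ in pending}
--     return [job for i, job in enumerate(jobs) if i not in unmatched]
-- ===== Notes on version B (the rewrite author's own statement) =====
-- stated objective: alternative
-- what changed: B transposes the loops: instead of testing every keyword against each job's title (job-major), it runs keyword-major over a shrinking pool of not-yet-matched (index, title) pairs with an early exit once all jobs matched, then rebuilds the result in original order from the unmatched index set.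
import Mathlib
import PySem

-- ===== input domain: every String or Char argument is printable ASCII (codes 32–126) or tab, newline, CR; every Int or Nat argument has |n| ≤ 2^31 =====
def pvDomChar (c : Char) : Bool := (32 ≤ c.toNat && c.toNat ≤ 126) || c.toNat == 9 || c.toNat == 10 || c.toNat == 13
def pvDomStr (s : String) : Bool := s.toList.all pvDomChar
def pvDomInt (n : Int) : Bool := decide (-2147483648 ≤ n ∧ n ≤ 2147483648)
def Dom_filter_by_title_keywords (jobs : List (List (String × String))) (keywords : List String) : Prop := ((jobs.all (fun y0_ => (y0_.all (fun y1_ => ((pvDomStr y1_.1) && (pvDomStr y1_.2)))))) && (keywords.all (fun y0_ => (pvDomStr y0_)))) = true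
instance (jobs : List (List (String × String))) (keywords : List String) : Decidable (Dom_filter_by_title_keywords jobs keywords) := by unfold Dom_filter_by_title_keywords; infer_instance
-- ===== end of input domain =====

-- B transposes A's loops: keyword-major over a shrinking pool of not-yet-matched titles
-- (with early exit) instead of job-major per-title keyword tests; objective: alternative.


-- ===== PORT A =====
-- _normalize: '[value.strip() for value in values if value and value.strip()]'
def pvNormalize (values : List String) : List String :=
  (values.filter (fun v => decide (v ≠ "") && decide (PySem.Str.strip v ≠ ""))).map
    (fun v => PySem.Str.strip v)

def filter_by_title_keywords (jobs : List (List (String × String))) (keywords : List String) : List (List (String × String)) :=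
  let keyword_list := (pvNormalize keywords).map (fun k => PySem.Str.lower k)
  if keyword_list.isEmpty then jobs
  else
    jobs.foldl (fun result job =>
      let title := PySem.Str.lower ((PySem.Dict.mk job).getD "title" "")
      if keyword_list.any (fun k => PySem.Str.isIn k title) then result ++ [job] else result) []

-- ===== PORT B =====
-- the 'for kw in kws' loop: pending = [(i, t) for i, t in pending if kw not in t]; break if empty
def pvDiscard : List String → List (Int × String) → List (Int × String)
  | [], pending => pending
  | kw :: ks, pending =>
      let pending' := pending.filter (fun p => !(PySem.Str.isIn kw p.2))
      if pending'.isEmpty then pending' else pvDiscard ks pending'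

def filter_by_title_keywords_alt (jobs : List (List (String × String))) (keywords : List String) : List (List (String × String)) :=
  let kws := (keywords.filter (fun k => decide (k ≠ "") && decide (PySem.Str.strip k ≠ ""))).map
    (fun k => PySem.Str.lower (PySem.Str.strip k))
  if kws.isEmpty then jobs
  else
    let pending := pvDiscard kws ((PySem.List.enumerate jobs).map
      (fun p => (p.1, PySem.Str.lower ((PySem.Dict.mk p.2).getD "title" ""))))
    let unmatched := PySem.Set.ofList (pending.map (fun p => p.1))
    ((PySem.List.enumerate jobs).filter (fun p => !(PySem.Set.contains unmatched p.1))).map (fun p => p.2)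

-- ===== PRECONDITION & SPEC =====
def Spec_filter_by_title_keywords (jobs : List (List (String × String))) (keywords : List String) (out : List (List (String × String))) : Prop := out = filter_by_title_keywords_alt jobs keywords
instance (jobs : List (List (String × String))) (keywords : List String) (out : List (List (String × String))) : Decidable (Spec_filter_by_title_keywords jobs keywords out) := by unfold Spec_filter_by_title_keywords; infer_instance

-- ===== CLAIM =====
def Claim_equal_filter_by_title_keywords : Prop := ∀ (jobs : List (List (String × String))) (keywords : List String), Dom_filter_by_title_keywords jobs keywords → Spec_filter_by_title_keywords jobs keywords (filter_by_title_keywords jobs keywords)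

-- ===== LEMMAS AND PROOFS =====

-- The keyword loop (with its early exit) is the composed filter over all keywords.
lemma pvDiscard_eq_filter (ks : List String) (pending : List (Int × String)) :
    pvDiscard ks pending
      = pending.filter (fun p => ks.all (fun kw => !(PySem.Str.isIn kw p.2))) := by
  induction ks generalizing pending with
  | nil => simp [pvDiscard]
  | cons kw ks ih =>
    simp only [pvDiscard]
    split_ifs with h
    · rw [List.isEmpty_iff] at h
      have : pending.filter (fun p => (kw :: ks).all (fun k => !(PySem.Str.isIn k p.2)))
          = (pending.filter (fun p => !(PySem.Str.isIn kw p.2))).filter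
              (fun p => ks.all (fun k => !(PySem.Str.isIn k p.2))) := by
        rw [List.filter_filter]
        apply List.filter_congr
        intro p _
        simp [Bool.and_comm]
      rw [this, h, List.filter_nil]
    · rw [ih, List.filter_filter]
      apply List.filter_congr
      intro p _
      simp [Bool.and_comm]

-- indices in 'enumerate' are unique: equal first components force equal pairs
lemma enum_fst_inj {α : Type} {xs : List α} {s : Int} {p q : Int × α}
    (hp : p ∈ PySem.List.enumerate xs s) (hq : q ∈ PySem.List.enumerate xs s)
    (h : p.1 = q.1) : p = q := by
  rw [PySem.List.mem_enumerate_iff] at hp hq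
  obtain ⟨k, hk, rfl⟩ := hp
  obtain ⟨k', hk', rfl⟩ := hq
  simp only at h
  have : k = k' := by omega
  subst this
  rfl

-- filtering 'enumerate' by a predicate on the element, then dropping the index, is a filter
lemma filter_snd_enumerate {α : Type} (xs : List α) (s : Int) (q : α → Bool) :
    ((PySem.List.enumerate xs s).filter (fun p => q p.2)).map (fun p => p.2)
      = xs.filter q := by
  induction xs generalizing s with
  | nil => simp [PySem.List.enumerate_nil]
  | cons x xs ih =>
    rw [PySem.List.enumerate_cons, List.filter_cons]
    by_cases hq : q x
    · simp [hq, ih]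
    · simp [hq, ih]

-- ===== VERDICT =====
theorem filter_by_title_keywords_spec : Claim_equal_filter_by_title_keywords := by
  intro jobs keywords _
  unfold Spec_filter_by_title_keywords
  simp only [filter_by_title_keywords, filter_by_title_keywords_alt, pvNormalize,
    List.map_map, Function.comp_def]
  split_ifs with h
  · rfl
  · rw [PySem.List.foldl_append_if_eq_filter, List.nil_append, pvDiscard_eq_filter]
    simp only [List.filter_map, List.map_map, Function.comp_def]
    set kws := (keywords.filter (fun k => decide (k ≠ "") && decide (PySem.Str.strip k ≠ ""))).map
      (fun k => PySem.Str.lower (PySem.Str.strip k)) with hkws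
    have hcongr : ∀ p ∈ PySem.List.enumerate jobs 0,
        (!(PySem.Set.contains (PySem.Set.ofList
            (((PySem.List.enumerate jobs 0).filter
              (fun p => kws.all (fun kw =>
                !(PySem.Str.isIn kw (PySem.Str.lower ((PySem.Dict.mk p.2).getD "title" "")))))).map
              (fun p => p.1))) p.1))
        = kws.any (fun k => PySem.Str.isIn k (PySem.Str.lower ((PySem.Dict.mk p.2).getD "title" ""))) := by
      intro p hp
      have hc : PySem.Set.contains (PySem.Set.ofList
            (((PySem.List.enumerate jobs 0).filter
              (fun p => kws.all (fun kw =>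
                !(PySem.Str.isIn kw (PySem.Str.lower ((PySem.Dict.mk p.2).getD "title" "")))))).map
              (fun p => p.1))) p.1
          = kws.all (fun kw =>
              !(PySem.Str.isIn kw (PySem.Str.lower ((PySem.Dict.mk p.2).getD "title" "")))) := by
        rw [Bool.eq_iff_iff]
        constructor
        · intro hcc
          have hm := (PySem.Set.contains_iff _ _).1 hcc
          rw [PySem.Set.mem_ofList, List.mem_map] at hm
          obtain ⟨q, hq, hq1⟩ := hm
          rw [List.mem_filter] at hq
          have heq : q = p := enum_fst_inj hq.1 hp hq1
          subst heq
          exact hq.2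
        · intro ha
          apply (PySem.Set.contains_iff _ _).2
          rw [PySem.Set.mem_ofList, List.mem_map]
          exact ⟨p, List.mem_filter.2 ⟨hp, ha⟩, rfl⟩
      rw [hc]
      rw [Bool.eq_iff_iff]
      simp [List.any_eq_true]
    rw [List.filter_congr hcongr]
    exact (filter_snd_enumerate jobs 0
      (fun job => kws.any (fun k =>
        PySem.Str.isIn k (PySem.Str.lower ((PySem.Dict.mk job).getD "title" ""))))).symm
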